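-- pv_equiv track=rewrite | github.com/rf-iasys/OEIS | OEIS_A001519.py | A001519
-- ===== SOURCE A (Python) =====
-- def A001519(n):
--     marked = []
--     current = 1
--     k = 2
--
--     while len(marked) < n:
--         marked.append(k//2)
--         k += current - k//2
--         current += current + k//2
--
--     return marked
-- ===== SOURCE B (Python) =====
-- def A001519(n):
--     # Stage 1: the first 2n Fibonacci numbers, seeded F(-1)=1, F(0)=0.
--     fibs = []
--     a, b = 1, 0
--     while len(fibs) < 2 * n:
--         fibs.append(a)
--         a, b = b, a + b
--     # Stage 2: the bisection -- every other Fibonacci number.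
--     return fibs[::2]
-- ===== Notes on version B (the rewrite author's own statement) =====
-- stated objective: alternative
-- what changed: Replaces A's one-pass loop over the opaque (current,k) state with floor-division extractions by two stages: first build the list of the first 2n Fibonacci numbers with a plain (a,b) pair, then slice out every other one (the sequence is the Fibonacci bisection F(2i-1)).
import Mathlib
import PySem

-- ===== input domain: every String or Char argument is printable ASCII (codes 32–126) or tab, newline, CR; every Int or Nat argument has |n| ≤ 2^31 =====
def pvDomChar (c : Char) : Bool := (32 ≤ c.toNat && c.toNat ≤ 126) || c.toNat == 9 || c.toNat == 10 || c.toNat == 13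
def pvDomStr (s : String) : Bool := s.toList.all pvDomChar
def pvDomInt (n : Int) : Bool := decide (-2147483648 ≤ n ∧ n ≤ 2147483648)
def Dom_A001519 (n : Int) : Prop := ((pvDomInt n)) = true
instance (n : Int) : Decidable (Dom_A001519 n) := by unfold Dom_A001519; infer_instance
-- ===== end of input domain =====

-- B replaces A's one-pass (current,k)-state loop by two stages: build the first 2n
-- Fibonacci numbers, then slice out every other one (alternative; same cost).

-- ===== PORT A =====
-- while len(marked) < n: append k//2; k += current - k//2; current += current + k//2
-- fuel = n.toNat bounds the loop (each iteration grows marked by one, so it suffices).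
def A001519loopA (fuel : Nat) (marked : List Int) (current k : Int) (n : Int) : List Int :=
  match fuel with
  | 0 => marked
  | f + 1 =>
    if (marked.length : Int) < n then
      let marked' := marked ++ [PySem.Int.floordiv k 2]
      let k' := k + (current - PySem.Int.floordiv k 2)
      let current' := current + (current + PySem.Int.floordiv k' 2)
      A001519loopA f marked' current' k' n
    else marked

def A001519 (n : Int) : List Int := A001519loopA n.toNat [] 1 2 n

-- ===== PORT B =====
-- stage 1: while len(fibs) < 2*n: fibs.append(a); a, b = b, a+b
-- fuel = (2*n).toNat bounds the loop (one element appended per iteration).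
def A001519fibLoop (fuel : Nat) (fibs : List Int) (a b : Int) (n : Int) : List Int :=
  match fuel with
  | 0 => fibs
  | f + 1 =>
    if (fibs.length : Int) < 2 * n then
      A001519fibLoop f (fibs ++ [a]) b (a + b) n
    else fibs

-- stage 2: fibs[::2]; slice? is none only for step 0, so getD [] just unwraps it.
def A001519_alt (n : Int) : List Int :=
  (PySem.List.slice? (A001519fibLoop (2 * n).toNat [] 1 0 n) none none 2).getD []

-- ===== PRECONDITION & SPEC =====
def Spec_A001519 (n : Int) (out : List Int) : Prop := out = A001519_alt n
instance (n : Int) (out : List Int) : Decidable (Spec_A001519 n out) := by unfold Spec_A001519; infer_instance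

-- ===== CLAIM (what is proved, stated in full; the proofs are below) =====
def Claim_equal_A001519 : Prop := ∀ (n : Int), Dom_A001519 n → Spec_A001519 n (A001519 n)

-- ===== LEMMAS AND PROOFS =====

-- reference run of A's loop: appended terms, with state abstracted to the pair (x, y)
def refA : Nat → Int → Int → List Int
  | 0, _, _ => []
  | m + 1, x, y => x :: refA m (x + y) (x + 2 * y)

-- reference run of B's stage 1: plain Fibonacci terms from the pair (a, b)
def fibSeq : Nat → Int → Int → List Int
  | 0, _, _ => []
  | m + 1, a, b => a :: fibSeq m b (a + b)

-- every other element, as fibs[::2] computes it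
def everyOther : List Int → List Int
  | [] => []
  | [x] => [x]
  | x :: _ :: r => x :: everyOther r

theorem floordiv_two_mul (x : Int) : PySem.Int.floordiv (2 * x) 2 = x := by
  rw [PySem.Int.floordiv_eq_ediv_of_pos (by omega)]; omega

-- A's loop with current = x + 2y, k = 2x and exactly-fitting fuel is refA
theorem loopA_run (fuel : Nat) (out : List Int) (x y n : Int)
    (h : (out.length : Int) + fuel = n) :
    A001519loopA fuel out (x + 2 * y) (2 * x) n = out ++ refA fuel x y := by
  induction fuel generalizing out x y with
  | zero => simp [A001519loopA, refA]
  | succ f ih =>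
    rw [A001519loopA, if_pos (by omega)]
    simp only [floordiv_two_mul x]
    have e1 : 2 * x + (x + 2 * y - x) = 2 * (x + y) := by ring
    rw [e1, floordiv_two_mul (x + y)]
    have e2 : x + 2 * y + (x + 2 * y + (x + y)) = (x + y) + 2 * (x + 2 * y) := by ring
    rw [e2, ih (out ++ [x]) (x + y) (x + 2 * y) (by simp; omega)]
    simp [refA]

-- B's stage-1 loop with exactly-fitting fuel is fibSeq
theorem fibLoop_run (fuel : Nat) (fibs : List Int) (a b n : Int)
    (h : (fibs.length : Int) + fuel = 2 * n) :
    A001519fibLoop fuel fibs a b n = fibs ++ fibSeq fuel a b := by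
  induction fuel generalizing fibs a b with
  | zero => simp [A001519fibLoop, fibSeq]
  | succ f ih =>
    rw [A001519fibLoop, if_pos (by omega)]
    rw [ih (fibs ++ [a]) b (a + b) (by simp; omega)]
    simp [fibSeq]

-- the bisection: every other Fibonacci number is a term of A's recurrence
theorem everyOther_fibSeq (m : Nat) (x y : Int) :
    everyOther (fibSeq (2 * m) x y) = refA m x y := by
  induction m generalizing x y with
  | zero => simp [fibSeq, refA, everyOther]
  | succ m ih =>
    have h : 2 * (m + 1) = (2 * m) + 1 + 1 := by omega
    rw [h]
    simp only [fibSeq, everyOther, refA]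
    have e : y + (x + y) = x + 2 * y := by ring
    rw [e, ih]

-- fibs[::2] via the filterMap that slice? with step 2 computes
theorem filterMap_two (xs : List Int) :
    List.filterMap (fun k : Nat => xs[(2 * (k : Int)).toNat]?)
      (List.range (if 0 < xs.length then (((xs.length : Int) + 2 - 1) / 2).toNat else 0)) =
    everyOther xs := by
  match xs with
  | [] => simp [everyOther]
  | [x] => simp [everyOther]
  | x :: y :: r =>
    have h : (if 0 < (x :: y :: r).length then ((((x :: y :: r).length : Int) + 2 - 1) / 2).toNat else 0)
        = (if 0 < r.length then (((r.length : Int) + 2 - 1) / 2).toNat else 0) + 1 := by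
      simp only [List.length_cons]
      split_ifs <;> push_cast <;> omega
    rw [h, List.range_succ_eq_map, List.filterMap_cons, List.filterMap_map]
    simp only [everyOther]
    have e0 : ((2 * ((0 : Nat) : Int)).toNat) = 0 := by norm_num
    rw [e0]
    simp only [List.getElem?_cons_zero]
    have ih := filterMap_two r
    rw [List.cons.injEq]
    refine ⟨rfl, ?_⟩
    rw [← ih]
    apply List.filterMap_congr
    intro k _
    have hk : ((2 * ((k + 1 : Nat) : Int)).toNat) = (2 * (k : Int)).toNat + 2 := by push_cast; omega
    simp only [Function.comp, Nat.succ_eq_add_one, hk]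
    rfl

theorem slice_two (xs : List Int) :
    PySem.List.slice? xs none none 2 = some (everyOther xs) := by
  simp only [PySem.List.slice?, PySem.List.sliceIndices]
  norm_num
  exact filterMap_two xs

-- ===== VERDICT (by name: the statement is the Claim_ definition above) =====
theorem A001519_spec : Claim_equal_A001519 := by
  intro n _
  unfold Spec_A001519 A001519 A001519_alt
  by_cases hn : 0 < n
  · have hA : A001519loopA n.toNat [] 1 2 n = refA n.toNat 1 0 := by
      have := loopA_run n.toNat [] 1 0 n (by simp; omega)
      simpa using this
    have hB : A001519fibLoop (2 * n).toNat [] 1 0 n = fibSeq (2 * n.toNat) 1 0 := by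
      have := fibLoop_run (2 * n).toNat [] 1 0 n (by simp; omega)
      have h2 : (2 * n).toNat = 2 * n.toNat := by omega
      simpa [h2] using this
    rw [hA, hB, slice_two, Option.getD_some, everyOther_fibSeq]
  · have h1 : n.toNat = 0 := by omega
    have h2 : (2 * n).toNat = 0 := by omega
    rw [h1, h2]
    simp [A001519loopA, A001519fibLoop, slice_two, everyOther]
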